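-- pv_equiv track=rewrite | github.com/miliar/Code_Jam_Webscraper | solutions_python/solutions_year16_round4_nr1/36.py | count
-- ===== SOURCE A (Python) =====
-- def make_sort(new_cur):
--     if len(new_cur) == 1:
--         return new_cur
--     middle = len(new_cur) // 2
--     left = make_sort(new_cur[:middle])
--     right = make_sort(new_cur[middle:])
--     if left < right:
--         return left + right
--     else:
--         return right + left
--
-- def count(N, R, P, S):
--     answers = []
--     for start in ['R', 'P', 'S']:
--         cur = [start]
--         while len(cur) != 2**N:
--             new_cur = []
--             for x in cur:
--                 if x == 'R':
--                     new_cur += ['S', 'R']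
--                 elif x == 'S':
--                     new_cur += ['P', 'S']
--                 else:
--                     new_cur += ['R', 'P']
--             cur = new_cur
--         if new_cur.count('R') == R and new_cur.count('P') == P and new_cur.count('S') == S:
--             answers.append(''.join(make_sort(new_cur)))
--     answers.sort()
--     if len(answers) != 0:
--         return answers[0]
--     return 'IMPOSSIBLE'
-- ===== SOURCE B (Python) =====
-- def merge(a, b):
--     return a + b if a < b else b + a
--
-- def count(N, R, P, S):
--     # bottom-up over rounds: canonical bracket string and (r, p, s) composition
--     # for each possible tournament winner, shared across the three starts
--     canR, canP, canS = 'R', 'P', 'S'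
--     cntR, cntP, cntS = (1, 0, 0), (0, 1, 0), (0, 0, 1)
--     for _ in range(N):
--         canR, canP, canS = merge(canS, canR), merge(canR, canP), merge(canP, canS)
--         cntR, cntP, cntS = (
--             (cntS[0] + cntR[0], cntS[1] + cntR[1], cntS[2] + cntR[2]),
--             (cntR[0] + cntP[0], cntR[1] + cntP[1], cntR[2] + cntP[2]),
--             (cntP[0] + cntS[0], cntP[1] + cntS[1], cntP[2] + cntS[2]),
--         )
--     answers = [can for can, cnt in ((canR, cntR), (canP, cntP), (canS, cntS))
--                if cnt == (R, P, S)]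
--     return min(answers) if answers else 'IMPOSSIBLE'
-- ===== Notes on version B (the rewrite author's own statement) =====
-- stated objective: alternative
-- what changed: B replaces A's three independent exponential bracket expansions and recursive make_sort with a single bottom-up recurrence that, per round, updates the canonical bracket string and the (R,P,S) letter counts for each of the three possible winners simultaneously, then filters and takes the min instead of expanding, counting and sorting.
-- crash fix: On N = 0 A raises UnboundLocalError (new_cur is read before the while body ever ran) while B returns the single-player answer; Pre_ also excludes N < 0, where A's while loop never terminates. — e.g. on count(0, 1, 0, 0): A raises UnboundLocalError, B returns "R"
import Mathlib
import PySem

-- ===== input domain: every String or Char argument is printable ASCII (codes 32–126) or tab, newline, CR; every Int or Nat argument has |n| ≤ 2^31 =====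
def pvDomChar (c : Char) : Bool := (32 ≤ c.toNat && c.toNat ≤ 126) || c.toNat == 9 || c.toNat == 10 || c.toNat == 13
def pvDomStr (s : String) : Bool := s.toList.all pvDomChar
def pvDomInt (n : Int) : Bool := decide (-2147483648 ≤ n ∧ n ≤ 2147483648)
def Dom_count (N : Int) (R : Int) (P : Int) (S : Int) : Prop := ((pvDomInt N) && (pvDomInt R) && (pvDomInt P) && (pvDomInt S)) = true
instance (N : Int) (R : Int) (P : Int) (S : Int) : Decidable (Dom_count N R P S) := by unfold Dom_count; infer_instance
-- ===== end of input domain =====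

-- B replaces A's three per-start bracket expansions + recursive make_sort by one bottom-up recurrence
-- computing, for each possible winner, its canonical bracket string and letter counts (objective: alternative).
-- Strings are carried as List Char in both ports: Python's str order IS Lean's < on toList (ASCII).

-- ===== PORT A =====
-- the inner 'for x in cur' accumulation loop of A
def pvExpandStep (cur : List Char) : List Char :=
  cur.foldl (fun new_cur x =>
    if x = 'R' then new_cur ++ ['S', 'R']
    else if x = 'S' then new_cur ++ ['P', 'S']
    else new_cur ++ ['R', 'P']) []

-- 'while len(cur) != 2**N': from [start] the lengths are 1,2,4,…, so for N ≥ 1 (Pre_) the loop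
-- runs exactly N times; fuel N.toNat makes the recursion total and is exact on Pre_.
def pvWhile (target : Nat) : Nat → List Char → List Char
  | 0, cur => cur
  | fuel+1, cur => if cur.length = target then cur else pvWhile target fuel (pvExpandStep cur)

-- make_sort; fuel = len(new_cur) bounds the recursion depth (halving: each callee list is shorter),
-- exact wherever Python's recursion terminates; len//2 = len/2 since lengths are nonnegative.
def pvMakeSort : Nat → List Char → List Char
  | 0, l => l
  | fuel+1, l =>
    if l.length = 1 then l
    else
      let middle := l.length / 2
      let left := pvMakeSort fuel (l.take middle)
      let right := pvMakeSort fuel (l.drop middle)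
      if left < right then left ++ right else right ++ left

def count (N : Int) (R : Int) (P : Int) (S : Int) : String :=
  let answers : List (List Char) :=
    (['R', 'P', 'S'] : List Char).foldl (fun answers start =>
      let cur := pvWhile (2 ^ N.toNat) N.toNat [start]
      if (PySem.List.count cur 'R' : Int) = R ∧ (PySem.List.count cur 'P' : Int) = P ∧
          (PySem.List.count cur 'S' : Int) = S
      then answers ++ [pvMakeSort cur.length cur]
      else answers) []
  match PySem.List.sorted answers (fun x => x) false with
  | a0 :: _ => String.ofList a0
  | [] => "IMPOSSIBLE"

-- ===== PORT B =====
def pvMerge (a b : List Char) : List Char := if a < b then a ++ b else b ++ a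

abbrev PvSt : Type :=
  (List Char × List Char × List Char) × ((Int × Int × Int) × (Int × Int × Int) × (Int × Int × Int))

-- one round of B's simultaneous recurrence
def pvBStep : PvSt → PvSt
  | ((canR, canP, canS), (cntR, cntP, cntS)) =>
    ((pvMerge canS canR, pvMerge canR canP, pvMerge canP canS),
     ((cntS.1 + cntR.1, cntS.2.1 + cntR.2.1, cntS.2.2 + cntR.2.2),
      (cntR.1 + cntP.1, cntR.2.1 + cntP.2.1, cntR.2.2 + cntP.2.2),
      (cntP.1 + cntS.1, cntP.2.1 + cntS.2.1, cntP.2.2 + cntS.2.2)))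

-- 'for _ in range(N)'
def pvBLoop : Nat → PvSt → PvSt
  | 0, st => st
  | n+1, st => pvBLoop n (pvBStep st)

def count_alt (N : Int) (R : Int) (P : Int) (S : Int) : String :=
  let st := pvBLoop N.toNat ((['R'], ['P'], ['S']), ((1, 0, 0), (0, 1, 0), (0, 0, 1)))
  let answers : List (List Char) :=
    ([(st.1.1, st.2.1), (st.1.2.1, st.2.2.1), (st.1.2.2, st.2.2.2)] :
        List (List Char × (Int × Int × Int))).foldl
      (fun acc pr => if pr.2 = (R, P, S) then acc ++ [pr.1] else acc) []
  match PySem.List.min? answers (fun x => x) with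
  | some m => String.ofList m
  | none => "IMPOSSIBLE"

-- ===== PRECONDITION & SPEC =====
-- Pre_ excludes N ≤ 0, where Python A never returns: at N = 0 it raises UnboundLocalError
-- (new_cur is read before the while body ever ran) and for N < 0 the while loop never terminates.
def Pre_count (N : Int) (R : Int) (P : Int) (S : Int) : Prop := 1 ≤ N
instance (N : Int) (R : Int) (P : Int) (S : Int) : Decidable (Pre_count N R P S) := by
  unfold Pre_count; infer_instance

def pvWitness_count : Int × Int × Int × Int := (2, 1, 1, 2)

-- On N = 0 A raises UnboundLocalError while B returns the single-player bracket answer.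
def Raises_count (N : Int) (R : Int) (P : Int) (S : Int) : Prop := N = 0
instance (N : Int) (R : Int) (P : Int) (S : Int) : Decidable (Raises_count N R P S) := by
  unfold Raises_count; infer_instance
def pvRaiseWitness_count : Int × Int × Int × Int := (0, 1, 0, 0)
def pvRaiseWitnessOut_count : String := "R"

def Spec_count (N : Int) (R : Int) (P : Int) (S : Int) (out : String) : Prop := out = count_alt N R P S
instance (N : Int) (R : Int) (P : Int) (S : Int) (out : String) : Decidable (Spec_count N R P S out) := by
  unfold Spec_count; infer_instance

-- ===== CLAIM (what is proved, stated in full; the proofs are below) =====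
def Claim_equal_count : Prop := ∀ (N : Int) (R : Int) (P : Int) (S : Int),
  Dom_count N R P S → Pre_count N R P S → Spec_count N R P S (count N R P S)

def Claim_raises_count : Prop :=
  (∀ (N : Int) (R : Int) (P : Int) (S : Int), Dom_count N R P S → Raises_count N R P S → ¬ Pre_count N R P S) ∧
  (Dom_count (pvRaiseWitness_count.1) (pvRaiseWitness_count.2.1) (pvRaiseWitness_count.2.2.1) (pvRaiseWitness_count.2.2.2) ∧
   Raises_count (pvRaiseWitness_count.1) (pvRaiseWitness_count.2.1) (pvRaiseWitness_count.2.2.1) (pvRaiseWitness_count.2.2.2) ∧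
   count_alt (pvRaiseWitness_count.1) (pvRaiseWitness_count.2.1) (pvRaiseWitness_count.2.2.1) (pvRaiseWitness_count.2.2.2) = pvRaiseWitnessOut_count)

-- ===== LEMMAS AND PROOFS =====

-- proof-side view of A's loops
def pvE (c : Char) : List Char :=
  if c = 'R' then ['S', 'R'] else if c = 'S' then ['P', 'S'] else ['R', 'P']

def pvIter : Nat → List Char → List Char
  | 0, l => l
  | f+1, l => pvIter f (pvExpandStep l)

def pvBeaten (c : Char) : Char := if c = 'R' then 'S' else if c = 'S' then 'P' else 'R'

def pvCanon : Nat → Char → List Char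
  | 0, c => [c]
  | f+1, c => pvMerge (pvCanon f (pvBeaten c)) (pvCanon f c)

def pvTri (f : Nat) (c : Char) : Int × Int × Int :=
  ((PySem.List.count (pvIter f [c]) 'R' : Int),
   (PySem.List.count (pvIter f [c]) 'P' : Int),
   (PySem.List.count (pvIter f [c]) 'S' : Int))

def pvInRPS (c : Char) : Prop := c = 'R' ∨ c = 'P' ∨ c = 'S'

lemma pvExpandStep_acc (l : List Char) (acc : List Char) :
    l.foldl (fun new_cur x =>
      if x = 'R' then new_cur ++ ['S', 'R']
      else if x = 'S' then new_cur ++ ['P', 'S']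
      else new_cur ++ ['R', 'P']) acc = acc ++ l.flatMap pvE := by
  induction l generalizing acc with
  | nil => simp
  | cons c t ih =>
    simp only [List.foldl, List.flatMap_cons]
    rw [ih]
    unfold pvE
    split_ifs <;> simp

lemma pvExpandStep_eq (l : List Char) : pvExpandStep l = l.flatMap pvE := by
  simpa using pvExpandStep_acc l []

lemma pvExpandStep_append (a b : List Char) :
    pvExpandStep (a ++ b) = pvExpandStep a ++ pvExpandStep b := by
  simp [pvExpandStep_eq]

lemma pvE_length (c : Char) : (pvE c).length = 2 := by
  unfold pvE; split_ifs <;> rfl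

lemma pvExpandStep_length (l : List Char) : (pvExpandStep l).length = 2 * l.length := by
  rw [pvExpandStep_eq]
  induction l with
  | nil => rfl
  | cons c t ih => simp [pvE_length, ih]; ring

lemma pvIter_length (f : Nat) (l : List Char) : (pvIter f l).length = 2 ^ f * l.length := by
  induction f generalizing l with
  | zero => simp [pvIter]
  | succ f ih => simp [pvIter, ih, pvExpandStep_length]; ring

lemma pvIter_append (f : Nat) (a b : List Char) :
    pvIter f (a ++ b) = pvIter f a ++ pvIter f b := by
  induction f generalizing a b with
  | zero => rfl
  | succ f ih => simp [pvIter, pvExpandStep_append, ih]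

lemma pvE_single (c : Char) (hc : pvInRPS c) : pvExpandStep [c] = [pvBeaten c, c] := by
  rcases hc with h | h | h <;> subst h <;> rfl

lemma pvBeaten_mem (c : Char) : pvInRPS (pvBeaten c) := by
  unfold pvBeaten pvInRPS; split_ifs <;> simp

lemma pvIter_succ_split (f : Nat) (c : Char) (hc : pvInRPS c) :
    pvIter (f + 1) [c] = pvIter f [pvBeaten c] ++ pvIter f [c] := by
  show pvIter f (pvExpandStep [c]) = _
  rw [pvE_single c hc]
  simpa using pvIter_append f [pvBeaten c] [c]

-- A's while loop from a list of length 2^k with target 2^(f+k) runs exactly f expansion steps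
lemma pvWhile_eq_iter (f : Nat) : ∀ (k : Nat) (cur : List Char), cur.length = 2 ^ k →
    pvWhile (2 ^ (f + k)) f cur = pvIter f cur := by
  induction f with
  | zero => intro k cur _; rfl
  | succ f ih =>
    intro k cur hlen
    have hne : cur.length ≠ 2 ^ (f + 1 + k) := by
      rw [hlen]
      intro h
      have := Nat.pow_right_injective (le_refl 2) h
      omega
    show (if cur.length = 2 ^ (f + 1 + k) then cur else _) = _
    rw [if_neg hne]
    have h2 : (pvExpandStep cur).length = 2 ^ (k + 1) := by
      rw [pvExpandStep_length, hlen, pow_succ]; ring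
    have := ih (k + 1) (pvExpandStep cur) h2
    rw [show f + 1 + k = f + (k + 1) by omega]
    exact this

-- make_sort on a 2^f-element expansion computes the canonical bracket, for any sufficient fuel
lemma pvMakeSort_canon (f : Nat) : ∀ (c : Char) (fuel : Nat), pvInRPS c →
    2 ^ f ≤ fuel → pvMakeSort fuel (pvIter f [c]) = pvCanon f c := by
  induction f with
  | zero =>
    intro c fuel _ hfuel
    cases fuel with
    | zero => exact absurd hfuel (by decide)
    | succ fuel => rfl
  | succ f ih =>
    intro c fuel hc hfuel
    have hlen : (pvIter (f + 1) [c]).length = 2 ^ (f + 1) := by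
      simp [pvIter_length]
    cases fuel with
    | zero =>
      exfalso
      have h1 : 1 ≤ 2 ^ (f + 1) := Nat.one_le_two_pow
      omega
    | succ fuel =>
      have hne : (pvIter (f + 1) [c]).length ≠ 1 := by
        rw [hlen]
        have : 2 ≤ 2 ^ (f + 1) := Nat.one_lt_two_pow (by omega)
        omega
      show (if (pvIter (f+1) [c]).length = 1 then _ else _) = _
      rw [if_neg hne]
      have hsplit := pvIter_succ_split f c hc
      have hla : (pvIter f [pvBeaten c]).length = 2 ^ f := by simp [pvIter_length]
      have hmid : (pvIter (f + 1) [c]).length / 2 = (pvIter f [pvBeaten c]).length := by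
        rw [hlen, hla, pow_succ]
        omega
      have htake : (pvIter (f + 1) [c]).take ((pvIter (f + 1) [c]).length / 2)
          = pvIter f [pvBeaten c] := by
        rw [hmid, hsplit, List.take_left]
      have hdrop : (pvIter (f + 1) [c]).drop ((pvIter (f + 1) [c]).length / 2)
          = pvIter f [c] := by
        rw [hmid, hsplit, List.drop_left]
      have hf : 2 ^ f ≤ fuel := by
        have : 2 ^ f + 2 ^ f = 2 ^ (f + 1) := by rw [pow_succ]; ring
        have h1 : 1 ≤ 2 ^ f := Nat.one_le_two_pow
        omega
      simp only [htake, hdrop]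
      rw [ih (pvBeaten c) fuel (pvBeaten_mem c) hf, ih c fuel hc hf]
      show (if pvCanon f (pvBeaten c) < pvCanon f c then _ else _) = _
      rfl

lemma pvTri_succ (f : Nat) (c : Char) (hc : pvInRPS c) :
    pvTri (f + 1) c = ((pvTri f (pvBeaten c)).1 + (pvTri f c).1,
      (pvTri f (pvBeaten c)).2.1 + (pvTri f c).2.1,
      (pvTri f (pvBeaten c)).2.2 + (pvTri f c).2.2) := by
  unfold pvTri
  rw [pvIter_succ_split f c hc]
  simp [PySem.List.count]

lemma pvBLoop_succ (n : Nat) (st : PvSt) : pvBLoop (n + 1) st = pvBStep (pvBLoop n st) := by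
  induction n generalizing st with
  | zero => rfl
  | succ n ih =>
    show pvBLoop (n + 1) (pvBStep st) = _
    rw [ih]
    rfl

lemma pvBLoop_invariant (f : Nat) :
    pvBLoop f ((['R'], ['P'], ['S']), ((1, 0, 0), (0, 1, 0), (0, 0, 1)))
      = ((pvCanon f 'R', pvCanon f 'P', pvCanon f 'S'), (pvTri f 'R', pvTri f 'P', pvTri f 'S')) := by
  induction f with
  | zero =>
    simp [pvBLoop, pvCanon, pvTri, pvIter, PySem.List.count]
  | succ f ih =>
    rw [pvBLoop_succ, ih]
    show ((pvMerge (pvCanon f 'S') (pvCanon f 'R'), pvMerge (pvCanon f 'R') (pvCanon f 'P'),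
            pvMerge (pvCanon f 'P') (pvCanon f 'S')), _) = _
    have hR := pvTri_succ f 'R' (by left; rfl)
    have hP := pvTri_succ f 'P' (by right; left; rfl)
    have hS := pvTri_succ f 'S' (by right; right; rfl)
    simp only [show pvBeaten 'R' = 'S' from rfl, show pvBeaten 'P' = 'R' from rfl,
      show pvBeaten 'S' = 'P' from rfl] at hR hP hS
    refine Prod.ext rfl ?_
    show (_, _, _) = (pvTri (f+1) 'R', pvTri (f+1) 'P', pvTri (f+1) 'S')
    rw [hR, hP, hS]

-- first element of Python's sort = Python's min, on lists of at most three items (pure case split)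
lemma pvSortedHead3 (a b c : List Char) :
    (PySem.List.sorted [a, b, c] (fun x => x) false).head? = PySem.List.min? [a, b, c] (fun x => x) := by
  simp only [PySem.List.sorted, PySem.List.min?, List.foldl, PySem.List.insertBy]
  split_ifs <;> simp_all [PySem.List.insertBy] <;> split_ifs <;> simp

lemma pvSortedHead2 (a b : List Char) :
    (PySem.List.sorted [a, b] (fun x => x) false).head? = PySem.List.min? [a, b] (fun x => x) := by
  simp only [PySem.List.sorted, PySem.List.min?, List.foldl, PySem.List.insertBy]
  split_ifs <;> simp_all

lemma pvSortedHead1 (a : List Char) :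
    (PySem.List.sorted [a] (fun x => x) false).head? = PySem.List.min? [a] (fun x => x) := by
  rfl

lemma pvFinish (l : List (List Char))
    (h : (PySem.List.sorted l (fun x => x) false).head? = PySem.List.min? l (fun x => x)) :
    (match PySem.List.sorted l (fun x => x) false with
      | a0 :: _ => String.ofList a0
      | [] => "IMPOSSIBLE")
    = (match PySem.List.min? l (fun x => x) with
      | some m => String.ofList m
      | none => "IMPOSSIBLE") := by
  rcases hs : PySem.List.sorted l (fun x => x) false with _ | ⟨a, t⟩ <;>
    rcases hm : PySem.List.min? l (fun x => x) with _ | m <;>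
      simp_all [PySem.List.sorted_eq_nil_iff, PySem.List.min?_eq_none_iff]

-- ===== VERDICT (by name: the statement is the Claim_ definition above) =====
theorem count_spec : Claim_equal_count := by
  intro N R P S _ hpre
  unfold Spec_count count count_alt
  have hw : ∀ c : Char, pvWhile (2 ^ N.toNat) N.toNat [c] = pvIter N.toNat [c] := by
    intro c
    have := pvWhile_eq_iter N.toNat 0 [c] (by simp)
    simpa using this
  have hms : ∀ c : Char, pvInRPS c →
      pvMakeSort (pvIter N.toNat [c]).length (pvIter N.toNat [c]) = pvCanon N.toNat c := by
    intro c hc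
    exact pvMakeSort_canon N.toNat c _ hc (by simp [pvIter_length])
  simp only [List.foldl, hw, hms 'R' (by left; rfl), hms 'P' (by right; left; rfl),
    hms 'S' (by right; right; rfl), pvBLoop_invariant, pvTri, Prod.mk.injEq]
  split_ifs <;>
    first
      | exact pvFinish _ rfl
      | exact pvFinish _ (pvSortedHead1 _)
      | exact pvFinish _ (pvSortedHead2 _ _)
      | exact pvFinish _ (pvSortedHead3 _ _ _)

theorem count_raises : Claim_raises_count := by
  unfold Claim_raises_count
  constructor
  · intro N R P S _ hr
    unfold Raises_count at hr
    unfold Pre_count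
    omega
  · exact ⟨by decide, by decide, by decide⟩

-- self-check: B's port really returns the stated value at the raise witness
theorem pvRaiseValue_ok : count_alt 0 1 0 0 = "R" := count_raises.2.2.2
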